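-- pv_equiv track=rewrite | github.com/nermadie/CodeForces_Solutions | CodeforcesRound978Div2/prob01.py | solve
-- ===== SOURCE A (Python) =====
-- def solve(n, r, a):
--     persons = sum(a)
--     able_alone_seats = r * 2 - persons if persons > r else persons
--     result = 0
--     for i in range(n):
--         if a[i] % 2 == 1:
--             if able_alone_seats > 0:
--                 able_alone_seats -= 1
--                 result += 1
--             a[i] -= 1
--         result += a[i]
--     return result
-- ===== SOURCE B (Python) =====
-- # Closed form instead of the greedy budget loop. Note: A mutates its argument
-- # list (decrements odd entries among the first n); B does not — the claimed
-- # equivalence is about the RETURN value only.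
-- def solve(n, r, a):
--     persons = sum(a)
--     budget = r * 2 - persons if persons > r else persons
--     head = [a[i] for i in range(n)]
--     odd = sum(x % 2 for x in head)
--     return sum(head) - odd + min(odd, max(0, budget))
-- ===== Notes on version B (the rewrite author's own statement) =====
-- stated objective: simpler
-- what changed: Replaced the stateful greedy loop (budget counter decremented per odd element, interleaved in-place decrements and accumulation) by a single closed-form expression: sum of the first n elements minus the odd count plus min(odd count, max(0, budget)).
import Mathlib
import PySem

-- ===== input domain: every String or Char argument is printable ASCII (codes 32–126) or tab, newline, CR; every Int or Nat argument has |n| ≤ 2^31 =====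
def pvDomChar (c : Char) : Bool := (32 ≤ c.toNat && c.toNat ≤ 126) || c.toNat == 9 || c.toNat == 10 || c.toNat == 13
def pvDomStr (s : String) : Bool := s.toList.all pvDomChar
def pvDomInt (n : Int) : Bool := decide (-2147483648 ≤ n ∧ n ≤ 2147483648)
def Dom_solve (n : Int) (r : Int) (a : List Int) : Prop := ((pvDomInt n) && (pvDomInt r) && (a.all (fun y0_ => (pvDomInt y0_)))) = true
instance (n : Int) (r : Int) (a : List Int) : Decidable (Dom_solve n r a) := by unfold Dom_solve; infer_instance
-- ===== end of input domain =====

-- B replaces A's stateful greedy budget loop by a closed-form arithmetic expression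
-- (objective: simpler). A mutates its argument list in Python (decrements odd entries
-- among the first n); the equivalence proved here is about the RETURN value only.

-- ===== PORT A =====
-- one iteration of A's for-loop; state = (current list a, able_alone_seats, result)
def solveStep (st : List Int × Int × Int) (i : Int) : List Int × Int × Int :=
  let a := st.1
  let able := st.2.1
  let result := st.2.2
  let ai := PySem.List.pyGetD a i 0   -- a[i]; total form, in range under Pre_solve
  if PySem.Int.mod ai 2 == 1 then
    let able' := if able > 0 then able - 1 else able
    let result' := if able > 0 then result + 1 else result
    let a' := PySem.List.pySetD a i (ai - 1)   -- a[i] -= 1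
    (a', able', result' + (ai - 1))
  else
    (a, able, result + ai)

def solve (n : Int) (r : Int) (a : List Int) : Int :=
  let persons := a.sum
  let able := if persons > r then r * 2 - persons else persons
  ((PySem.List.pyRange 0 n 1).foldl solveStep (a, able, 0)).2.2

-- ===== PORT B =====
def solve_alt (n : Int) (r : Int) (a : List Int) : Int :=
  let persons := a.sum
  let budget := if persons > r then r * 2 - persons else persons
  let head := (PySem.List.pyRange 0 n 1).map (fun i => PySem.List.pyGetD a i 0)
  let odd := (head.map (fun x => PySem.Int.mod x 2)).sum
  head.sum - odd + min odd (max 0 budget)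

-- ===== PRECONDITION & SPEC =====
-- A raises IndexError when n > len(a); those inputs are excluded. (Negative n is fine:
-- range(n) is empty and both return 0.)
def Pre_solve (n : Int) (r : Int) (a : List Int) : Prop := n ≤ (a.length : Int)
instance (n : Int) (r : Int) (a : List Int) : Decidable (Pre_solve n r a) := by unfold Pre_solve; infer_instance
def pvWitness_solve : Int × Int × List Int := (3, 2, [1, 2, 3])

def Spec_solve (n : Int) (r : Int) (a : List Int) (out : Int) : Prop := out = solve_alt n r a
instance (n : Int) (r : Int) (a : List Int) (out : Int) : Decidable (Spec_solve n r a out) := by unfold Spec_solve; infer_instance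

-- ===== CLAIM (what is proved, stated in full; the proofs are below) =====
def Claim_equal_solve : Prop := ∀ (n : Int) (r : Int) (a : List Int), Dom_solve n r a → Pre_solve n r a → Spec_solve n r a (solve n r a)

-- ===== LEMMAS AND PROOFS =====

-- spine of A's loop as direct recursion over the processed prefix
def runG (xs : List Int) (able res : Int) : Int :=
  match xs with
  | [] => res
  | x :: t =>
    if PySem.Int.mod x 2 == 1 then
      if able > 0 then runG t (able - 1) (res + 1 + (x - 1)) else runG t able (res + (x - 1))
    else runG t able (res + x)

lemma runG_closed (xs : List Int) (able res : Int) :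
    runG xs able res =
      res + xs.sum - (xs.map (fun x => PySem.Int.mod x 2)).sum +
        min ((xs.map (fun x => PySem.Int.mod x 2)).sum) (max 0 able) := by
  induction xs generalizing able res with
  | nil => simp [runG]
  | cons x t ih =>
    have hm : PySem.Int.mod x 2 = x % 2 := PySem.Int.mod_eq_emod_of_pos (by omega)
    have hx : x % 2 = 0 ∨ x % 2 = 1 := Int.emod_two_eq_zero_or_one x
    simp only [runG, List.sum_cons, List.map_cons, hm]
    have hnn : (0:Int) ≤ (t.map (fun x => PySem.Int.mod x 2)).sum := by
      apply List.sum_nonneg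
      intro y hy
      simp only [List.mem_map] at hy
      obtain ⟨z, _, rfl⟩ := hy
      exact PySem.Int.mod_nonneg z (by omega)
    rcases hx with h | h <;> rw [h]
    · simp only [show (((0:Int)) == 1) = false by decide, if_neg Bool.false_ne_true, ih]
      omega
    · simp only [show (((1:Int)) == 1) = true by decide, if_pos]
      split_ifs with hab <;> rw [ih] <;> omega

lemma loop_eq_runG (m : Nat) : ∀ (k : Int) (A : List Int) (able res : Int),
    0 ≤ k → k.toNat + m ≤ A.length →
    ((PySem.List.pyRange k (k + m) 1).foldl solveStep (A, able, res)).2.2 =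
      runG ((A.drop k.toNat).take m) able res := by
  induction m with
  | zero =>
    intro k A able res hk hlen
    rw [show k + (0:Nat) = k by push_cast; ring, PySem.List.pyRange_one_eq_nil le_rfl]
    simp [runG]
  | succ m ih =>
    intro k A able res hk hlen
    have hklen : k.toNat < A.length := by omega
    have hcons : PySem.List.pyRange k (k + (m + 1 : Nat)) 1
        = k :: PySem.List.pyRange (k + 1) ((k + 1) + m) 1 := by
      rw [PySem.List.pyRange_one_cons (by push_cast; omega)]
      congr 1
      push_cast; ring
    have hget : PySem.List.pyGetD A k 0 = A[k.toNat] :=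
      PySem.List.pyGetD_eq_getElem A 0 hk (by omega)
    have hdropA : A.drop k.toNat = A[k.toNat] :: A.drop (k.toNat + 1) :=
      List.drop_eq_getElem_cons hklen
    rw [hcons, List.foldl_cons]
    by_cases hodd : PySem.Int.mod A[k.toNat] 2 == 1
    · -- odd branch: list mutated at index k
      have hset : PySem.List.pySetD A k (A[k.toNat] - 1) = A.set k.toNat (A[k.toNat] - 1) :=
        PySem.List.pySetD_of_nonneg A _ hk
      have hstep : solveStep (A, able, res) k =
          (A.set k.toNat (A[k.toNat] - 1),
           (if able > 0 then able - 1 else able),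
           (if able > 0 then res + 1 else res) + (A[k.toNat] - 1)) := by
        simp only [solveStep, hget, hodd, if_pos, hset]
      rw [hstep,
        ih (k + 1) _ _ _ (by omega) (by simp [List.length_set]; omega)]
      have hdropset : (A.set k.toNat (A[k.toNat] - 1)).drop (k + 1).toNat
          = A.drop (k + 1).toNat := by
        apply List.drop_set_of_lt
        omega
      rw [hdropset, show (k + 1).toNat = k.toNat + 1 by omega]
      rw [hdropA, List.take_succ_cons, runG, if_pos hodd]
      split_ifs with hab <;> congr 1 <;> ring_nf
    · have hstep : solveStep (A, able, res) k = (A, able, res + A[k.toNat]) := by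
        simp only [solveStep, hget]
        rw [if_neg (by simpa using hodd)]
      rw [hstep, ih (k + 1) _ _ _ (by omega) (by omega)]
      rw [show (k + 1).toNat = k.toNat + 1 by omega]
      rw [hdropA, List.take_succ_cons, runG, if_neg (by simpa using hodd)]

lemma head_eq_take (n : Int) (a : List Int) (_h0 : 0 ≤ n) (hlen : n ≤ (a.length : Int)) :
    (PySem.List.pyRange 0 n 1).map (fun i => PySem.List.pyGetD a i 0) = a.take n.toNat := by
  apply List.ext_getElem
  · simp [PySem.List.length_pyRange_one]
    omega
  · intro k h1 h2
    simp only [List.getElem_map, PySem.List.getElem_pyRange_one]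
    rw [List.getElem_take]
    have hk : k < n.toNat := by
      simpa [PySem.List.length_pyRange_one] using (by simpa using h1)
    rw [show (0:Int) + (k:Int) = (k:Int) by ring]
    rw [PySem.List.pyGetD_eq_getElem a 0 (by omega) (by omega)]
    simp

-- ===== VERDICT (by name: the statement is the Claim_ definition above) =====
theorem solve_spec : Claim_equal_solve := by
  intro n r a _ hpre
  unfold Spec_solve solve solve_alt
  by_cases hn : 0 ≤ n
  · rw [head_eq_take n a hn hpre]
    have h := loop_eq_runG n.toNat 0 a
      (if a.sum > r then r * 2 - a.sum else a.sum) 0 le_rfl (by simpa using hpre)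
    rw [show (0:Int) + (n.toNat : Int) = n by omega] at h
    simp only [h, Int.toNat_zero, List.drop_zero]
    rw [runG_closed]
    ring
  · rw [PySem.List.pyRange_one_eq_nil (by omega)]
    simp only [List.map_nil, List.foldl_nil, List.sum_nil]
    split_ifs <;> omega
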